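-- pv_equiv track=rewrite | github.com/siasyt/DevIAshiyunTANG | chef-oui-chef.py | check_salute
-- ===== SOURCE A (Python) =====
-- def check_salute(couloir):
--     if not isinstance(couloir, str):
--         return 0
--
--     salutations = 0
--     left_officers = []
--     right_officers = []
--
--     for i, direction in enumerate(couloir):
--         if direction not in ['-', '>', '<']:
--             return 0
--         if direction == '>':
--             right_officers.append(i)
--         elif direction == '<':
--             left_officers.append(i)
--             salutations += len(right_officers)
--
--     return salutations
-- ===== SOURCE B (Python) =====
-- def check_salute(couloir):
--     if not isinstance(couloir, str):
--         return 0
--     if any(c not in '-><' for c in couloir):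
--         return 0
--     return sum(couloir.count('>', 0, j) for j, c in enumerate(couloir) if c == '<')
-- ===== Notes on version B (the rewrite author's own statement) =====
-- stated objective: simpler
-- what changed: B validates the whole string up front and then sums, for each '<', the count of '>' in the prefix before it (repeated prefix scans), instead of A's single accumulating pass that collects officer index lists and may bail out mid-scan.
import Mathlib
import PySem

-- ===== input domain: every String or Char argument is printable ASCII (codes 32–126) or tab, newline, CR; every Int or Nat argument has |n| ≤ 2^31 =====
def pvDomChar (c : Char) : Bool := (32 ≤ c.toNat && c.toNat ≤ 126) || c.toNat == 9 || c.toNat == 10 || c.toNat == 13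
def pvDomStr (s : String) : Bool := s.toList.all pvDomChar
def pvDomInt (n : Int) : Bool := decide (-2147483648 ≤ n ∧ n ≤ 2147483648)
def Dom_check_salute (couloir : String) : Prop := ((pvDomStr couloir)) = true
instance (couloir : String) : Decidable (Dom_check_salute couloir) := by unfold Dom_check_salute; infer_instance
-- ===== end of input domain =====

-- B validates the whole string up front and then sums, for each '<', the '>'-count of its prefix
-- (repeated prefix scans) instead of A's single accumulating pass; objective: simpler (not faster).

-- ===== PORT A =====
-- the loop of A: i = enumerate index, ro/lo = right_officers/left_officers, sal = salutations
def check_salute_go (cs : List Char) (i : Nat) (ro lo : List Nat) (sal : Int) : Int :=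
  match cs with
  | [] => sal
  | c :: rest =>
    if ¬ (c = '-' ∨ c = '>' ∨ c = '<') then 0
    else if c = '>' then check_salute_go rest (i + 1) (ro ++ [i]) lo sal
    else if c = '<' then check_salute_go rest (i + 1) ro (lo ++ [i]) (sal + ro.length)
    else check_salute_go rest (i + 1) ro lo sal

def check_salute (couloir : String) : Int :=
  check_salute_go couloir.toList 0 [] [] 0

-- ===== PORT B =====
def check_salute_alt (couloir : String) : Int :=
  let cs := couloir.toList
  if cs.all (fun c => c = '-' || c = '>' || c = '<') then
    ((List.range cs.length).map
      (fun j => if cs.getD j ' ' = '<' then ((cs.take j).count '>' : Int) else 0)).sum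
  else 0

-- ===== PRECONDITION & SPEC =====
def Spec_check_salute (couloir : String) (out : Int) : Prop := out = check_salute_alt couloir
instance (couloir : String) (out : Int) : Decidable (Spec_check_salute couloir out) := by unfold Spec_check_salute; infer_instance

-- ===== CLAIM (what is proved, stated in full; the proofs are below) =====
def Claim_equal_check_salute : Prop := ∀ (couloir : String), Dom_check_salute couloir → Spec_check_salute couloir (check_salute couloir)

-- ===== LEMMAS AND PROOFS =====

-- B's sum with every prefix count offset by r (the number of '>' already seen)
def pvBsum (r : Nat) (cs : List Char) : Int :=
  ((List.range cs.length).map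
    (fun j => if cs.getD j ' ' = '<' then ((r : Int) + (cs.take j).count '>') else 0)).sum

lemma pvBsum_cons (r : Nat) (c : Char) (cs : List Char) :
    pvBsum r (c :: cs) =
      (if c = '<' then (r : Int) else 0) + pvBsum (r + if c = '>' then 1 else 0) cs := by
  simp only [pvBsum, List.length_cons, List.range_succ_eq_map, List.map_cons, List.map_map,
    List.sum_cons, List.getD_cons_zero, List.take_zero, List.count_nil]
  congr 2
  split_ifs <;> simp <;> intro a ha <;>
    by_cases h : cs[a]?.getD ' ' = '<' <;>
    simp_all [List.count_cons] <;> push_cast <;> ring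

lemma check_salute_go_eq (cs : List Char) :
    ∀ (i : Nat) (ro lo : List Nat) (sal : Int),
      check_salute_go cs i ro lo sal =
        if cs.all (fun c => c = '-' || c = '>' || c = '<') then sal + pvBsum ro.length cs
        else 0 := by
  induction cs with
  | nil => intro i ro lo sal; simp [check_salute_go, pvBsum]
  | cons c rest ih =>
    intro i ro lo sal
    simp only [check_salute_go, List.all_cons]
    rw [pvBsum_cons]
    by_cases hv : c = '-' ∨ c = '>' ∨ c = '<'
    · simp only [hv, not_true, if_false]
      rcases hv with h | h | h <;> subst h <;>
        simp [ih] <;> split_ifs <;> push_cast <;> ring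
    · have h1 : c ≠ '-' := fun h => hv (Or.inl h)
      have h2 : c ≠ '>' := fun h => hv (Or.inr (Or.inl h))
      have h3 : c ≠ '<' := fun h => hv (Or.inr (Or.inr h))
      simp [h1, h2, h3]

lemma pvBsum_zero (cs : List Char) :
    pvBsum 0 cs =
      ((List.range cs.length).map
        (fun j => if cs.getD j ' ' = '<' then ((cs.take j).count '>' : Int) else 0)).sum := by
  simp [pvBsum]

-- ===== VERDICT (by name: the statement is the Claim_ definition above) =====
theorem check_salute_spec : Claim_equal_check_salute := by
  intro couloir _
  unfold Spec_check_salute check_salute check_salute_alt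
  rw [check_salute_go_eq]
  simp [pvBsum_zero]
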